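-- pv_equiv track=rewrite | github.com/Zaicu/Socomec_ChatBot | data_pretreatment.py | best_words
-- ===== SOURCE A (Python) =====
-- def best_words(classes, N=10):
-- 	best = {}
-- 	for classe, words in classes.items():
-- 		if (not classe in best):
-- 			best[classe] = []
-- 		for word in words.items():
-- 			if (len(best[classe]) < N):
-- 				best[classe].append(word)
-- 				for i in reversed(range(len(best[classe]) - 1)):
-- 					if (best[classe][i + 1][1] > best[classe][i][1]):
-- 						temp = best[classe][i + 1]
-- 						best[classe][i + 1] = best[classe][i]
-- 						best[classe][i] = temp
-- 			else:
-- 				if (word[1] > best[classe][-1][1]):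
-- 					best[classe][-1] = word
-- 					for i in reversed(range(N-1)):
-- 						if (best[classe][i + 1][1] > best[classe][i][1]):
-- 							temp = best[classe][i + 1]
-- 							best[classe][i + 1] = best[classe][i]
-- 							best[classe][i] = temp
-- 	return best
-- ===== SOURCE B (Python) =====
-- def best_words(classes, N=10):
--     # For each class, one full stable descending sort by count, then take the
--     # first N entries (same tie-breaking as A's bounded insertion structure).
--     return {classe: sorted(words.items(), key=lambda kv: kv[1], reverse=True)[:N]
--             for classe, words in classes.items()}
-- ===== Notes on version B (the rewrite author's own statement) =====
-- stated objective: simpler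
-- what changed: Replaces A's per-class bounded insertion/bubble maintenance of a top-N buffer with a single stable full sort by count (descending) plus truncation to the first N; Pre_ excludes nonpositive N together with a non-empty word dict, where A raises IndexError, and duplicate class keys, which a Python dict argument can never present.
import Mathlib
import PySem

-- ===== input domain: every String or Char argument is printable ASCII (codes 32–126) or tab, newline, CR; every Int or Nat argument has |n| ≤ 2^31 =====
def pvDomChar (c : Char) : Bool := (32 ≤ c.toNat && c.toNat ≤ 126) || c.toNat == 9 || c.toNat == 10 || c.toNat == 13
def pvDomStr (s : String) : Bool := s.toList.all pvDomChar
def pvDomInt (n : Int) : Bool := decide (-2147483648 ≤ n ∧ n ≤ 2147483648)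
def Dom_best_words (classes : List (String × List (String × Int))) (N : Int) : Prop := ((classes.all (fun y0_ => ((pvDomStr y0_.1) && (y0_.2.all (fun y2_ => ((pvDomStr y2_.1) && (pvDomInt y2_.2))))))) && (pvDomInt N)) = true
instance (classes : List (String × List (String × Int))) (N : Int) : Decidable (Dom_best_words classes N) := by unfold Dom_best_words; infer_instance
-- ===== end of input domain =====

-- B replaces A's per-class bounded insertion/bubble top-N buffer with one stable
-- full descending sort by count plus truncation to N (objective: simpler).
-- A mutates only its own local dict, so return-value equivalence is the whole story.

-- ===== PORT A =====
-- one step of Python's inner 'if best[classe][i+1][1] > best[classe][i][1]: swap'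
-- (List.getD is exact here: every call the loop makes uses in-range indices)
def pvStepAt (xs : List (String × Int)) (i : Nat) : List (String × Int) :=
  if (xs.getD (i + 1) ("", 0)).2 > (xs.getD i ("", 0)).2 then
    (xs.set (i + 1) (xs.getD i ("", 0))).set i (xs.getD (i + 1) ("", 0))
  else xs

def pvBubLoop (xs : List (String × Int)) : Nat → List (String × Int)
  | 0 => xs
  | Nat.succ i => pvBubLoop (pvStepAt xs i) i

-- body of Python's 'for word in words.items()', acting on the list best[classe]
-- (pvBubLoop xs k runs the swap step at i = k-1, …, 0, i.e. 'for i in reversed(range(k))')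
def pvInnerStep (N : Int) (cur : List (String × Int)) (w : String × Int) : List (String × Int) :=
  if (cur.length : Int) < N then
    pvBubLoop (cur ++ [w]) ((cur ++ [w]).length - 1)
  else
    match PySem.List.pyGet? cur (-1) with
    | none => cur
    | some last =>
      if w.2 > last.2 then
        pvBubLoop (PySem.List.pySetD cur (-1) w) (N - 1).toNat
      else cur

-- Python mutates best[classe] in place; ported as a re-insert at the same key
-- (Dict.insert on a present key keeps its position); 'return best' is the dict's items
def best_words (classes : List (String × List (String × Int))) (N : Int) : List (String × List (String × Int)) :=
  (classes.foldl
    (fun best cw =>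
      let best := if best.contains cw.1 then best else best.insert cw.1 []
      cw.2.foldl (fun b w => b.insert cw.1 (pvInnerStep N (b.getD cw.1 []) w)) best)
    PySem.Dict.empty).items

-- ===== PORT B =====
-- dict comprehension: per class insert sorted(words.items(), key=·[1], reverse=True)[:N]
def best_words_alt (classes : List (String × List (String × Int))) (N : Int) : List (String × List (String × Int)) :=
  (classes.foldl
    (fun d cw =>
      d.insert cw.1 (PySem.List.slice (PySem.List.sorted cw.2 (fun kv => kv.2) true) none (some N)))
    PySem.Dict.empty).items

-- ===== PRECONDITION & SPEC =====
-- Pre_ excludes (a) N ≤ 0 together with any non-empty word list, where Python A raises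
-- IndexError on best[classe][-1], and (b) duplicate class keys, which a Python dict
-- argument can never present (the association list stands for a dict).
def Pre_best_words (classes : List (String × List (String × Int))) (N : Int) : Prop :=
  (classes.map Prod.fst).Nodup ∧ (1 ≤ N ∨ ∀ p ∈ classes, p.2 = [])
instance (classes : List (String × List (String × Int))) (N : Int) : Decidable (Pre_best_words classes N) := by unfold Pre_best_words; infer_instance

def pvWitness_best_words : (List (String × List (String × Int))) × Int :=
  ([("spam", [("hi", 3), ("lo", 1), ("lo2", 1)]), ("ham", [("x", 2)])], 2)

def Spec_best_words (classes : List (String × List (String × Int))) (N : Int) (out : List (String × List (String × Int))) : Prop := out = best_words_alt classes N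
instance (classes : List (String × List (String × Int))) (N : Int) (out : List (String × List (String × Int))) : Decidable (Spec_best_words classes N out) := by unfold Spec_best_words; infer_instance

-- ===== CLAIM (what is proved, stated in full; the proofs are below) =====
def Claim_equal_best_words : Prop := ∀ (classes : List (String × List (String × Int))) (N : Int), Dom_best_words classes N → Pre_best_words classes N → Spec_best_words classes N (best_words classes N)

-- ===== LEMMAS AND PROOFS =====

def pvIns (w : String × Int) (xs : List (String × Int)) : List (String × Int) :=
  PySem.List.insertBy (fun a b => decide (b.2 < a.2)) w xs

theorem pvIns_nil (w : String × Int) : pvIns w [] = [w] := rfl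

theorem pvIns_cons (w y : String × Int) (t : List (String × Int)) :
    pvIns w (y :: t) = if y.2 < w.2 then w :: y :: t else y :: pvIns w t := by
  simp [pvIns, PySem.List.insertBy]

theorem length_pvStepAt (xs : List (String × Int)) (i : Nat) :
    (pvStepAt xs i).length = xs.length := by
  unfold pvStepAt; split <;> simp

theorem pvStepAt_append {ys zs : List (String × Int)} {i : Nat} (h : i + 1 < ys.length) :
    pvStepAt (ys ++ zs) i = pvStepAt ys i ++ zs := by
  unfold pvStepAt
  rw [List.getD_eq_getElem?_getD, List.getD_eq_getElem?_getD,
      List.getElem?_append_left h, List.getElem?_append_left (by omega),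
      ← List.getD_eq_getElem?_getD, ← List.getD_eq_getElem?_getD]
  split
  · rw [List.set_append, if_pos h, List.set_append, if_pos (by rw [List.length_set]; omega)]
  · rfl

theorem pvBubLoop_append {ys zs : List (String × Int)} {k : Nat} (h : k < ys.length) :
    pvBubLoop (ys ++ zs) k = pvBubLoop ys k ++ zs := by
  induction k generalizing ys with
  | zero => rfl
  | succ i ih =>
    show pvBubLoop (pvStepAt (ys ++ zs) i) i = pvBubLoop (pvStepAt ys i) i ++ zs
    rw [pvStepAt_append h, ih (by rw [length_pvStepAt]; omega)]

theorem pvBubLoop_sorted {xs : List (String × Int)} {k : Nat}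
    (hs : xs.Pairwise (fun a b => b.2 ≤ a.2)) (h : k < xs.length) :
    pvBubLoop xs k = xs := by
  induction k with
  | zero => rfl
  | succ i ih =>
    show pvBubLoop (pvStepAt xs i) i = xs
    have hst : pvStepAt xs i = xs := by
      unfold pvStepAt
      rw [if_neg]
      have := List.pairwise_iff_getElem.1 hs i (i+1) (by omega) (by omega) (by omega)
      rw [List.getD_eq_getElem?_getD, List.getD_eq_getElem?_getD,
          List.getElem?_eq_getElem (by omega : i + 1 < xs.length),
          List.getElem?_eq_getElem (by omega : i < xs.length)]
      simpa using this
    rw [hst, ih (by omega)]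

theorem pvIns_append_last {t : List (String × Int)} {z w : String × Int} (h : z.2 < w.2) :
    pvIns w (t ++ [z]) = pvIns w t ++ [z] := by
  induction t with
  | nil => simp [pvIns_nil, pvIns_cons, h]
  | cons y ys ih =>
    rw [List.cons_append, pvIns_cons, pvIns_cons]
    split <;> simp [ih]

theorem pvBubLoop_insert {xs : List (String × Int)} {w : String × Int}
    (hs : xs.Pairwise (fun a b => b.2 ≤ a.2)) :
    pvBubLoop (xs ++ [w]) xs.length = pvIns w xs := by
  induction xs using List.reverseRecOn with
  | nil => simp [pvBubLoop, pvIns_nil]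
  | append_singleton t z ih =>
    have ht : t.Pairwise (fun a b => b.2 ≤ a.2) := (List.pairwise_append.1 hs).1
    have hz : ∀ y ∈ t, z.2 ≤ y.2 := fun y hy => (List.pairwise_append.1 hs).2.2 y hy z (by simp)
    rw [show (t ++ [z]).length = t.length + 1 by simp]
    show pvBubLoop (pvStepAt ((t ++ [z]) ++ [w]) t.length) t.length = _
    have hget1 : ((t ++ [z]) ++ [w]).getD (t.length + 1) ("", 0) = w := by
      rw [List.getD_eq_getElem?_getD, show t.length + 1 = (t ++ [z]).length by simp,
          List.getElem?_concat_length]; rfl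
    have hget0 : ((t ++ [z]) ++ [w]).getD t.length ("", 0) = z := by
      rw [List.getD_eq_getElem?_getD, List.getElem?_append_left (by simp),
          List.getElem?_concat_length]; rfl
    by_cases hc : z.2 < w.2
    · have hswap : pvStepAt ((t ++ [z]) ++ [w]) t.length = (t ++ [w]) ++ [z] := by
        unfold pvStepAt
        rw [hget1, hget0, if_pos hc, List.append_assoc,
            List.set_append, if_neg (by simp), List.set_append, if_neg (by simp)]
        simp
      rw [hswap, pvBubLoop_append (by simp), ih ht, pvIns_append_last hc]
    · have hno : pvStepAt ((t ++ [z]) ++ [w]) t.length = (t ++ [z]) ++ [w] := by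
        unfold pvStepAt
        rw [hget1, hget0, if_neg (by simpa using hc)]
      rw [hno, pvBubLoop_append (by simp), pvBubLoop_sorted hs (by simp),
          pvIns, PySem.List.insertBy_of_forall_not_before]
      intro y hy
      simp only [List.mem_append, List.mem_singleton] at hy
      rcases hy with hy | rfl
      · simp only [decide_eq_false_iff_not, not_lt]
        exact le_trans (le_of_not_gt (by simpa using hc)) (hz y hy)
      · simpa using hc

theorem pvTake_pvIns_trigger {s : List (String × Int)} {w : String × Int} {n : Nat}
    (hn : n < s.length) (ht : s[n].2 < w.2) :
    (pvIns w s).take (n + 1) = pvIns w (s.take n) := by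
  induction n generalizing s with
  | zero =>
    match s, hn with
    | y :: t, _ =>
      simp only [List.getElem_cons_zero] at ht
      simp [pvIns_cons, ht, pvIns_nil]
  | succ m ih =>
    match s, hn with
    | y :: t, hn =>
      rw [List.take_succ_cons, pvIns_cons, pvIns_cons]
      by_cases hy : y.2 < w.2
      · simp [hy]
      · rw [if_neg hy, if_neg hy, List.take_succ_cons]
        congr 1
        exact ih (by simpa using hn) (by simpa using ht)

theorem pvTake_pvIns_notrigger {s : List (String × Int)} {w : String × Int} {n : Nat}
    (hn : n ≤ s.length) (h : ∀ y ∈ s.take n, ¬ (y.2 < w.2)) :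
    (pvIns w s).take n = s.take n := by
  induction n generalizing s with
  | zero => simp
  | succ m ih =>
    match s, hn with
    | y :: t, hn =>
      have hy : ¬ (y.2 < w.2) := h y (by simp)
      rw [pvIns_cons, if_neg hy, List.take_succ_cons, List.take_succ_cons]
      congr 1
      exact ih (by simp at hn; omega) (fun z hz => h z (by rw [List.take_succ_cons]; exact List.mem_cons_of_mem _ hz))

theorem length_pvIns (w : String × Int) (xs : List (String × Int)) :
    (pvIns w xs).length = xs.length + 1 := by
  induction xs with
  | nil => rfl
  | cons y t ih =>
    rw [pvIns_cons]
    split <;> simp [ih]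

theorem pvSorted_append_singleton (p : List (String × Int)) (w : String × Int) :
    PySem.List.sorted (p ++ [w]) (fun kv => kv.2) true
      = pvIns w (PySem.List.sorted p (fun kv => kv.2) true) := by
  rw [PySem.List.sorted_rev_eq_foldl_insertBy, PySem.List.sorted_rev_eq_foldl_insertBy,
      List.foldl_append]
  rfl

theorem pvInnerStep_sorted {N : Int} (hN : 1 ≤ N) (p : List (String × Int)) (w : String × Int) :
    pvInnerStep N ((PySem.List.sorted p (fun kv => kv.2) true).take N.toNat) w
      = (PySem.List.sorted (p ++ [w]) (fun kv => kv.2) true).take N.toNat := by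
  set s := PySem.List.sorted p (fun kv => kv.2) true with hsdef
  have hs : s.Pairwise (fun a b => b.2 ≤ a.2) := PySem.List.sorted_pairwise_rev p _
  have hNt : (N.toNat : Int) = N := Int.toNat_of_nonneg (by omega)
  rw [pvSorted_append_singleton, ← hsdef]
  by_cases hlt : s.length < N.toNat
  · have htake : s.take N.toNat = s := List.take_of_length_le (by omega)
    unfold pvInnerStep
    rw [htake, if_pos (by omega), show (s ++ [w]).length - 1 = s.length by simp,
        pvBubLoop_insert hs, List.take_of_length_le (by rw [length_pvIns]; omega)]
  · have hlen : (s.take N.toNat).length = N.toNat := by rw [List.length_take]; omega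
    have hne : s.take N.toNat ≠ [] := by
      intro hc; rw [hc] at hlen; simp at hlen; omega
    have hi0 : N.toNat - 1 < s.length := by omega
    have hlast : (s.take N.toNat).getLast? = some (s[N.toNat - 1]'hi0) := by
      rw [List.getLast?_eq_getElem?, hlen, List.getElem?_take, if_pos (by omega)]
      rw [List.getElem?_eq_getElem (by omega)]
    unfold pvInnerStep
    rw [if_neg (by rw [hlen]; omega), PySem.List.pyGet?_neg_one, hlast]
    dsimp only
    by_cases hgt : w.2 > (s[N.toNat - 1]'hi0).2
    · rw [if_pos hgt]
      have hset : PySem.List.pySetD (s.take N.toNat) (-1) w = s.take (N.toNat - 1) ++ [w] := by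
        have hidx : PySem.List.pyIdx? (s.take N.toNat).length (-1) = some (N.toNat - 1) := by
          rw [hlen]; simp [PySem.List.pyIdx?]; omega
        rw [PySem.List.pySetD, PySem.List.pySet?, hidx, Option.map_some, Option.getD_some]
        rw [show s.take N.toNat = s.take (N.toNat - 1) ++ [s[N.toNat - 1]'hi0] by
          rw [← List.take_succ_eq_append_getElem (by omega)]; congr 1; omega]
        rw [List.set_append, if_neg (by simp [Nat.min_eq_left (by omega : N.toNat - 1 ≤ s.length)])]
        simp [Nat.min_eq_left (by omega : N.toNat - 1 ≤ s.length)]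
      rw [hset, show (N - 1).toNat = (s.take (N.toNat - 1)).length by simp; omega,
          pvBubLoop_insert (hs.sublist (List.take_sublist _ _)),
          show N.toNat = (N.toNat - 1) + 1 by omega,
          pvTake_pvIns_trigger (by omega) hgt]
      norm_num
    · rw [if_neg hgt]
      rw [pvTake_pvIns_notrigger (by omega)]
      intro y hy
      obtain ⟨i, hi, rfl⟩ := List.getElem_of_mem hy
      rw [List.getElem_take] at *
      have hi' : i < N.toNat := by simp at hi; omega
      have hle : (s[N.toNat - 1]'hi0).2 ≤ (s[i]'(by simp at hi; omega)).2 := by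
        rcases eq_or_lt_of_le (by omega : i ≤ N.toNat - 1) with heq | hlt'
        · subst heq; exact le_refl _
        · exact List.pairwise_iff_getElem.1 hs i (N.toNat - 1) (by simp at hi; omega) (by omega) hlt'
      omega

theorem pvInner_fold {N : Int} (hN : 1 ≤ N) (ws p : List (String × Int)) :
    ws.foldl (pvInnerStep N) ((PySem.List.sorted p (fun kv => kv.2) true).take N.toNat)
      = (PySem.List.sorted (p ++ ws) (fun kv => kv.2) true).take N.toNat := by
  induction ws generalizing p with
  | nil => simp
  | cons w ws ih =>
    rw [List.foldl_cons, pvInnerStep_sorted hN, ih (p ++ [w])]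
    simp

theorem pvInner_fold_nil {N : Int} (hN : 1 ≤ N) (ws : List (String × Int)) :
    ws.foldl (pvInnerStep N) []
      = (PySem.List.sorted ws (fun kv => kv.2) true).take N.toNat := by
  have h := pvInner_fold hN ws []
  rw [show PySem.List.sorted ([] : List (String × Int)) (fun kv => kv.2) true = [] from rfl] at h
  simpa using h

theorem pvDict_fold (N : Int) (c : String) (ws : List (String × Int))
    (d : PySem.Dict String (List (String × Int))) (v : List (String × Int)) :
    ws.foldl (fun b w => b.insert c (pvInnerStep N (b.getD c []) w)) (d.insert c v)
      = d.insert c (ws.foldl (pvInnerStep N) v) := by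
  induction ws generalizing v with
  | nil => rfl
  | cons w ws ih =>
    rw [List.foldl_cons, List.foldl_cons, PySem.Dict.getD_insert_self,
        PySem.Dict.insert_insert_self, ih]

theorem pvSlice_nil (N : Int) :
    PySem.List.slice ([] : List (String × Int)) none (some N) = [] := by
  simp [PySem.List.slice, PySem.List.clampIdx]

theorem pvPerClass {N : Int} (ws : List (String × Int))
    (h : 1 ≤ N ∨ ws = []) :
    ws.foldl (pvInnerStep N) []
      = PySem.List.slice (PySem.List.sorted ws (fun kv => kv.2) true) none (some N) := by
  rcases h with hN | rfl
  · rw [pvInner_fold_nil hN, PySem.List.slice_to _ (by omega)]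
  · rw [show PySem.List.sorted ([] : List (String × Int)) (fun kv => kv.2) true = [] from rfl,
        pvSlice_nil]
    rfl

theorem pvOuter_items (N : Int) (classes : List (String × List (String × Int)))
    (d : PySem.Dict String (List (String × Int)))
    (hd : ∀ cw ∈ classes, d.contains cw.1 = false)
    (hnd : (classes.map Prod.fst).Nodup) :
    (classes.foldl
      (fun best cw =>
        let best := if best.contains cw.1 then best else best.insert cw.1 []
        cw.2.foldl (fun b w => b.insert cw.1 (pvInnerStep N (b.getD cw.1 []) w)) best)
      d).items
    = d.items ++ classes.map (fun cw => (cw.1, cw.2.foldl (pvInnerStep N) [])) := by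
  induction classes generalizing d with
  | nil => simp
  | cons cw rest ih =>
    rw [List.foldl_cons]
    have hc : d.contains cw.1 = false := hd cw (by simp)
    simp only [hc, if_false, Bool.false_eq_true]
    rw [pvDict_fold]
    rw [ih _ (fun c hc' => by
        rw [PySem.Dict.contains_insert]
        have hne : c.1 ≠ cw.1 := by
          intro he
          have := (List.nodup_cons.1 hnd).1
          exact this (he ▸ List.mem_map_of_mem hc')
        simp [hne, hd c (List.mem_cons_of_mem _ hc')])
      (List.nodup_cons.1 hnd).2]
    rw [PySem.Dict.items_insert_of_not_contains _ _ hc]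
    simp

theorem pvAlt_items (N : Int) (classes : List (String × List (String × Int)))
    (hnd : (classes.map Prod.fst).Nodup) :
    best_words_alt classes N
      = classes.map (fun cw =>
          (cw.1, PySem.List.slice (PySem.List.sorted cw.2 (fun kv => kv.2) true) none (some N))) := by
  unfold best_words_alt
  rw [PySem.Dict.items_foldl_insert_fresh classes (fun cw => cw.1)
      (fun cw => PySem.List.slice (PySem.List.sorted cw.2 (fun kv => kv.2) true) none (some N))
      PySem.Dict.empty (fun a _ => PySem.Dict.contains_empty _) hnd]
  rfl

theorem main_eq (classes : List (String × List (String × Int))) (N : Int)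
    (hnd : (classes.map Prod.fst).Nodup)
    (hN : 1 ≤ N ∨ ∀ p ∈ classes, p.2 = []) :
    best_words classes N = best_words_alt classes N := by
  unfold best_words
  rw [pvOuter_items N classes PySem.Dict.empty (fun a _ => PySem.Dict.contains_empty _) hnd,
      pvAlt_items N classes hnd]
  rw [show (PySem.Dict.empty : PySem.Dict String (List (String × Int))).items = [] from rfl,
      List.nil_append]
  apply List.map_congr_left
  intro cw hcw
  have hp : (1 ≤ N) ∨ cw.2 = [] := by
    rcases hN with h | h
    · exact Or.inl h
    · exact Or.inr (h cw hcw)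
  rw [pvPerClass cw.2 hp]

-- ===== VERDICT (by name: the statement is the Claim_ definition above) =====
theorem best_words_spec : Claim_equal_best_words := by
  intro classes N _ hPre
  show best_words classes N = best_words_alt classes N
  exact main_eq classes N hPre.1 hPre.2
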